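-- pv_equiv track=rewrite | github.com/nbalance97/Programmers | 위클리 챌린지/[4주차] 직업군 추천하기.py | solution
-- ===== SOURCE A (Python) =====
-- def solution(table, languages, preference):
--     answer = ''
--
--     score = {languages[i]: preference[i] for i in range(len(languages))}
--     max_score = 0
--     for information in table:
--         inf = information.split()
--         # 언어별 점수 부여
--         current_score = {inf[i]: 6-i for i in range(1, len(inf))}
--         total_score = 0
--         # 현재 직업에서의 점수 구함
--         for lan in score.keys():
--             if current_score.get(lan) != None:
--                 total_score += (current_score[lan] * score[lan])
--
--         # 동점이면 사전순으로 앞서는걸 정답으로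
--         if total_score == max_score:
--             if answer > inf[0]:
--                 answer = inf[0]
--
--         # 최대 점수일때 갱신
--         if total_score > max_score:
--             max_score = total_score
--             answer = inf[0]
--
--     return answer
-- ===== SOURCE B (Python) =====
-- def solution(table, languages, preference):
--     score = dict(zip(languages, preference))
--     results = []
--     for row in table:
--         words = row.split()
--         weight = {w: 6 - i for i, w in enumerate(words) if i}
--         total = sum(weight[lang] * pref for lang, pref in score.items() if lang in weight)
--         results.append((total, words[0]))
--     best = min(results, key=lambda t: (-t[0], t[1]), default=(0, ''))
--     return best[1] if best[0] > 0 else ''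
-- ===== Notes on version B (the rewrite author's own statement) =====
-- stated objective: simpler
-- what changed: B builds one (total, name) tuple per job row and selects the answer with a single min(..., key=lambda t: (-t[0], t[1])) over that list (returning '' when no positive total exists), instead of A's inline answer/max_score state machine with separate tie and update branches; the language-score map is built with dict(zip(...)) instead of an index-based comprehension.
-- outside the precondition, e.g. on solution(['a x', '   '], ['x'], [1]): A returns 'a', B raises IndexError
import Mathlib
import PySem

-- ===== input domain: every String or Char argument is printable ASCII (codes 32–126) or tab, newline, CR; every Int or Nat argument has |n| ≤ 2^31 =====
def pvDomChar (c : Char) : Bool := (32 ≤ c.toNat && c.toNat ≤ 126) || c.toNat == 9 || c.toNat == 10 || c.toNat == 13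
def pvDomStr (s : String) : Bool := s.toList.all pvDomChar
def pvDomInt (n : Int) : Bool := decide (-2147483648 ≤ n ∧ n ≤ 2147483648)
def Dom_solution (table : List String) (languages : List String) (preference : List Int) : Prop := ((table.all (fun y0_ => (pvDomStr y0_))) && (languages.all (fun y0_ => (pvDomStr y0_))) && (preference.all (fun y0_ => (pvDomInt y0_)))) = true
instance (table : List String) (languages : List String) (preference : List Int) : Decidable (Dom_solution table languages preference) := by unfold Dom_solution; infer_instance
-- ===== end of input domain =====

-- B replaces A's inline answer/max_score state machine by a per-row (total, name) list
-- selected with min by key (-total, name); objective: simpler. Return values only, no mutation.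

-- ===== PORT A =====
def solution (table : List String) (languages : List String) (preference : List Int) : String :=
  -- score = {languages[i]: preference[i] for i in range(len(languages))}
  let score : PySem.Dict String Int :=
    (PySem.List.pyRange 0 (languages.length : Int) 1).foldl
      (fun d i => d.insert (PySem.List.pyGetD languages i "") (PySem.List.pyGetD preference i 0))
      PySem.Dict.empty
  -- the loop over table carries the state (answer, max_score)
  let st := table.foldl
    (fun (st : String × Int) information =>
      let inf := PySem.Str.split₀ information
      -- current_score = {inf[i]: 6-i for i in range(1, len(inf))}
      let current_score : PySem.Dict String Int :=
        (PySem.List.pyRange 1 (inf.length : Int) 1).foldl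
          (fun d i => d.insert (PySem.List.pyGetD inf i "") (6 - i)) PySem.Dict.empty
      -- for lan in score.keys(): if current_score.get(lan) != None: total += cur[lan]*score[lan]
      let total_score : Int := score.keys.foldl
        (fun acc lan => if (current_score.get? lan).isSome
          then acc + current_score.getD lan 0 * score.getD lan 0 else acc) 0
      let inf0 := PySem.List.pyGetD inf 0 ""
      -- if total_score == max_score: if answer > inf[0]: answer = inf[0]
      let answer := if total_score = st.2 ∧ inf0 < st.1 then inf0 else st.1
      -- if total_score > max_score: max_score, answer = total_score, inf[0]
      if st.2 < total_score then (inf0, total_score) else (answer, st.2))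
    ("", 0)
  st.1

-- ===== PORT B =====
-- key(t) = (-t[0], t[1]); keyLt r b ↔ key r < key b (lexicographic, as Python compares tuples)
def keyLt (r b : Int × String) : Bool :=
  decide (-r.1 < -b.1 ∨ (-r.1 = -b.1 ∧ r.2 < b.2))

def solution_alt (table : List String) (languages : List String) (preference : List Int) : String :=
  -- score = dict(zip(languages, preference))
  let score : PySem.Dict String Int :=
    (languages.zip preference).foldl (fun d p => d.insert p.1 p.2) PySem.Dict.empty
  -- results.append((total, words[0])) per row
  let results : List (Int × String) := table.foldl
    (fun acc row =>
      let words := PySem.Str.split₀ row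
      -- weight = {w: 6 - i for i, w in enumerate(words) if i}
      let weight : PySem.Dict String Int :=
        (PySem.List.enumerate words 0).foldl
          (fun d p => if p.1 ≠ 0 then d.insert p.2 (6 - p.1) else d) PySem.Dict.empty
      -- total = sum(weight[lang] * pref for lang, pref in score.items() if lang in weight)
      let total : Int :=
        ((score.items.filter (fun pr => weight.contains pr.1)).map
          (fun pr => weight.getD pr.1 0 * pr.2)).sum
      acc ++ [(total, PySem.List.pyGetD words 0 "")]) []
  -- best = min(results, key=lambda t: (-t[0], t[1]), default=(0, ''))
  let best := match results with
    | [] => ((0 : Int), "")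
    | h :: t => t.foldl (fun b r => if keyLt r b then r else b) h
  -- return best[1] if best[0] > 0 else ''
  if 0 < best.1 then best.2 else ""

-- ===== PRECONDITION & SPEC =====
-- Pre_ excludes (a) preference shorter than languages (A raises IndexError building score)
-- and (b) rows whose split() is empty (A raises IndexError at inf[0] on every such row it
-- reaches with total_score == max_score, and B always raises there); see claim.json cites
-- for an excluded input on which A still returns.
def Pre_solution (table : List String) (languages : List String) (preference : List Int) : Prop :=
  languages.length ≤ preference.length ∧ ∀ s ∈ table, PySem.Str.split₀ s ≠ []
instance (table : List String) (languages : List String) (preference : List Int) : Decidable (Pre_solution table languages preference) := by unfold Pre_solution; infer_instance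

def pvWitness_solution : List String × List String × List Int :=
  (["dev python c", "chef cook"], ["python", "c"], [4, 2])

def Spec_solution (table : List String) (languages : List String) (preference : List Int) (out : String) : Prop := out = solution_alt table languages preference
instance (table : List String) (languages : List String) (preference : List Int) (out : String) : Decidable (Spec_solution table languages preference out) := by unfold Spec_solution; infer_instance

-- ===== CLAIM (what is proved, stated in full; the proofs are below) =====
def Claim_equal_solution : Prop := ∀ (table : List String) (languages : List String) (preference : List Int), Dom_solution table languages preference → Pre_solution table languages preference → Spec_solution table languages preference (solution table languages preference)

-- ===== LEMMAS AND PROOFS =====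

-- A's per-row (total_score, inf[0]) computation, abstracted out of A's loop body
def pvTotalName (score : PySem.Dict String Int) (information : String) : Int × String :=
  let inf := PySem.Str.split₀ information
  let current_score : PySem.Dict String Int :=
    (PySem.List.pyRange 1 (inf.length : Int) 1).foldl
      (fun d i => d.insert (PySem.List.pyGetD inf i "") (6 - i)) PySem.Dict.empty
  let total_score : Int := score.keys.foldl
    (fun acc lan => if (current_score.get? lan).isSome
      then acc + current_score.getD lan 0 * score.getD lan 0 else acc) 0
  (total_score, PySem.List.pyGetD inf 0 "")

-- B's per-row (total, words[0]) computation
def pvRowB (score : PySem.Dict String Int) (row : String) : Int × String :=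
  let words := PySem.Str.split₀ row
  let weight : PySem.Dict String Int :=
    (PySem.List.enumerate words 0).foldl
      (fun d p => if p.1 ≠ 0 then d.insert p.2 (6 - p.1) else d) PySem.Dict.empty
  (((score.items.filter (fun pr => weight.contains pr.1)).map
      (fun pr => weight.getD pr.1 0 * pr.2)).sum,
   PySem.List.pyGetD words 0 "")

-- A's loop step, as a function of the row's (total, name)
def pvAst (st : String × Int) (r : Int × String) : String × Int :=
  let answer := if r.1 = st.2 ∧ r.2 < st.1 then r.2 else st.1
  if st.2 < r.1 then (r.2, r.1) else (answer, st.2)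

-- the correspondence between B's running minimum and A's (answer, max_score) state
def pvInv (b : Int × String) : String × Int :=
  (if 0 < b.1 then b.2 else "", max 0 b.1)

-- the two score dicts coincide when preference is long enough
theorem pv_score_eq (languages : List String) (preference : List Int)
    (h : languages.length ≤ preference.length) :
    (PySem.List.pyRange 0 (languages.length : Int) 1).foldl
      (fun d i => d.insert (PySem.List.pyGetD languages i "") (PySem.List.pyGetD preference i 0))
      PySem.Dict.empty
    = (languages.zip preference).foldl (fun d p => d.insert p.1 p.2) PySem.Dict.empty := by
  have hlen : languages.length = (languages.zip preference).length := by
    rw [List.length_zip]; omega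
  rw [show ((languages.length : Int)) = ((languages.zip preference).length : Int) by
    exact_mod_cast congrArg Nat.cast hlen]
  rw [PySem.List.foldl_congr_mem _ _
    (fun d j => (fun (d : PySem.Dict String Int) (p : String × Int) => d.insert p.1 p.2) d
      (PySem.List.pyGetD (languages.zip preference) j ("", 0))) _
    (by
      intro d i hi
      rw [PySem.List.mem_pyRange_one] at hi
      obtain ⟨h0, h1⟩ := hi
      obtain ⟨k, rfl⟩ := Int.eq_ofNat_of_zero_le h0
      have hk : k < (languages.zip preference).length := by exact_mod_cast h1
      have hkl : k < languages.length := by omega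
      have hkp : k < preference.length := by
        rw [List.length_zip] at hk; omega
      show d.insert (PySem.List.pyGetD languages ((k : Nat) : Int) "")
            (PySem.List.pyGetD preference ((k : Nat) : Int) 0)
          = d.insert (PySem.List.pyGetD (languages.zip preference) ((k : Nat) : Int) ("", 0)).1
              (PySem.List.pyGetD (languages.zip preference) ((k : Nat) : Int) ("", 0)).2
      rw [PySem.List.pyGetD_natCast, PySem.List.pyGetD_natCast, PySem.List.pyGetD_natCast]
      rw [List.getD_eq_getElem _ _ hk, List.getD_eq_getElem _ _ hkl, List.getD_eq_getElem _ _ hkp]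
      simp [List.getElem_zip])]
  exact PySem.List.foldl_pyRange_zero_pyGetD' (languages.zip preference) ("", 0)
    (fun d p => d.insert p.1 p.2) PySem.Dict.empty

-- the two per-row weight dicts coincide
theorem pv_weight_eq (inf : List String) :
    (PySem.List.pyRange 1 (inf.length : Int) 1).foldl
      (fun d i => d.insert (PySem.List.pyGetD inf i "") (6 - i)) PySem.Dict.empty
    = (PySem.List.enumerate inf 0).foldl
        (fun d p => if p.1 ≠ 0 then d.insert p.2 (6 - p.1) else d) PySem.Dict.empty := by
  rw [PySem.List.enumerate_eq_map_pyRange (d := ""), List.foldl_map]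
  show _ = List.foldl
      (fun (x : PySem.Dict String Int) (y : Int) =>
        if y ≠ 0 then x.insert (PySem.List.pyGetD inf y "") (6 - y) else x)
      PySem.Dict.empty (PySem.List.pyRange 0 (inf.length : Int) 1)
  by_cases hn : inf.length = 0
  · have hz : ((inf.length : Int)) = 0 := by exact_mod_cast hn
    rw [hz]
    rw [PySem.List.pyRange_one_eq_nil (by norm_num), PySem.List.pyRange_one_eq_nil (by norm_num)]
    rfl
  · have h1 : (0 : Int) < (inf.length : Int) := by
      have : 0 < inf.length := Nat.pos_of_ne_zero hn
      exact_mod_cast this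
    rw [PySem.List.pyRange_one_cons h1]
    simp only [List.foldl_cons]
    rw [if_neg (by norm_num)]
    exact (PySem.List.foldl_congr_mem _ _ _ _ (by
      intro d i hi
      rw [PySem.List.mem_pyRange_one] at hi
      rw [if_pos (by omega)])).symm

-- A's key-loop sum equals B's items-loop sum, for any dict with unique keys
theorem pv_total_eq (score w : PySem.Dict String Int) (hnd : score.keys.Nodup) :
    score.keys.foldl
      (fun acc lan => if (w.get? lan).isSome
        then acc + w.getD lan 0 * score.getD lan 0 else acc) 0
    = ((score.items.filter (fun pr => w.contains pr.1)).map
        (fun pr => w.getD pr.1 0 * pr.2)).sum := by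
  rw [PySem.List.foldl_if_eq_foldl_filter]
  rw [PySem.List.foldl_add (g := fun lan => w.getD lan 0 * score.getD lan 0)]
  rw [PySem.Dict.items_eq_map_keys score hnd 0]
  rw [List.filter_map, List.map_map]
  have hp : ((fun pr : String × Int => w.contains pr.1) ∘ fun k => (k, score.getD k 0))
      = fun lan => (w.get? lan).isSome := by
    funext k
    simp [Function.comp, PySem.Dict.contains_eq_isSome_get?]
  rw [hp]
  simp [Function.comp_def]

theorem pv_nodup (zs : List (String × Int)) :
    ((zs.foldl (fun d p => d.insert p.1 p.2) PySem.Dict.empty).keys).Nodup := by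
  exact PySem.Dict.nodup_keys_foldl_insert_key zs (fun p => p.1) (fun _ p => p.2)
    PySem.Dict.empty PySem.Dict.nodup_keys_empty

theorem pv_row_eq (d : PySem.Dict String Int) (hnd : d.keys.Nodup) (s : String) :
    pvTotalName d s = pvRowB d s := by
  simp only [pvTotalName, pvRowB]
  rw [pv_weight_eq]
  rw [pv_total_eq _ _ hnd]

theorem pv_step_comm (b r : Int × String) :
    pvAst (pvInv b) r = pvInv (if keyLt r b then r else b) := by
  rcases b with ⟨p, m⟩
  rcases r with ⟨t, n⟩
  by_cases hp : 0 < p <;>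
    simp only [pvAst, pvInv, keyLt, decide_eq_true_eq, hp, if_true, if_false] <;>
    split_ifs <;>
    simp_all [Prod.ext_iff] <;>
    first
      | omega
      | (exfalso
         rcases ‹p < t ∨ t = p ∧ n.toList < m.toList› with h1 | ⟨h1, h2⟩
         · omega
         · exact absurd (‹t = max 0 p → m.toList ≤ n.toList› (by omega)) (not_le.mpr h2))

theorem pv_head (r : Int × String) : pvAst ("", 0) r = pvInv r := by
  rcases r with ⟨t, n⟩
  simp only [pvAst, pvInv]
  split_ifs <;> simp_all [Prod.ext_iff]
  omega

theorem pv_fold_inv (t : List (Int × String)) (b : Int × String) :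
    t.foldl pvAst (pvInv b) = pvInv (t.foldl (fun b r => if keyLt r b then r else b) b) := by
  induction t generalizing b with
  | nil => rfl
  | cons h t ih => simp only [List.foldl_cons, pv_step_comm]; exact ih _

theorem pv_main (rows : List (Int × String)) :
    (rows.foldl pvAst ("", 0)).1
    = (pvInv (match rows with
        | [] => ((0 : Int), "")
        | h :: t => t.foldl (fun b r => if keyLt r b then r else b) h)).1 := by
  cases rows with
  | nil => rfl
  | cons hd tl =>
    simp only [List.foldl_cons]
    rw [pv_head, pv_fold_inv]

-- ===== VERDICT (by name: the statement is the Claim_ definition above) =====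
theorem solution_spec : Claim_equal_solution := by
  intro table languages preference _hdom hpre
  obtain ⟨hlen, -⟩ := hpre
  unfold Spec_solution solution solution_alt
  rw [pv_score_eq languages preference hlen]
  show (table.foldl (fun st s => pvAst st (pvTotalName
      ((languages.zip preference).foldl (fun d p => d.insert p.1 p.2) PySem.Dict.empty) s))
      ("", 0)).1
    = (let best := match table.foldl (fun acc row => acc ++ [pvRowB
          ((languages.zip preference).foldl (fun d p => d.insert p.1 p.2) PySem.Dict.empty) row]) [] with
        | [] => ((0 : Int), "")
        | h :: t => t.foldl (fun b r => if keyLt r b then r else b) h;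
       if 0 < best.1 then best.2 else "")
  have hrow : ∀ s, pvTotalName
      ((languages.zip preference).foldl (fun d p => d.insert p.1 p.2) PySem.Dict.empty) s
      = pvRowB ((languages.zip preference).foldl (fun d p => d.insert p.1 p.2) PySem.Dict.empty) s :=
    fun s => pv_row_eq _ (pv_nodup _) s
  simp only [hrow]
  rw [PySem.List.foldl_append_singleton_eq_map, List.nil_append]
  rw [← List.foldl_map]
  exact pv_main _
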